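-- pv_equiv track=rewrite | github.com/hkmztrk/SMILESVecProteinRepresentation | source/wordextract.py | createSeqLists
-- ===== SOURCE A (Python) =====
-- def createSeqLists(smiles, q):
--   lingoList = []
--   smiles = smiles.upper()
--
--   if len(smiles) < q:
--     while len(smiles) < q:
--       smiles = smiles + "_"
--
--   for m in range(q):
--     lim = m
--     while (lim < len(smiles)):
--       lingo = smiles[lim:lim+q]
--       lingoList.append(lingo)
--
--       lim +=q
--
--
--   return lingoList
-- ===== SOURCE B (Python) =====
-- def createSeqLists(smiles, q):
--   # Residue-class bucket distribution: one pass over the padded string,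
--   # slice i goes to bucket i % q; concatenating buckets 0..q-1 reproduces
--   # the original outer-residue/inner-step ordering.
--   if q <= 0:
--     return []
--   s = smiles.upper()
--   s = s + "_" * (q - len(s))
--   buckets = [[] for _ in range(q)]
--   for i in range(len(s)):
--     buckets[i % q].append(s[i:i+q])
--   out = []
--   for b in buckets:
--     out += b
--   return out
-- ===== Notes on version B (the rewrite author's own statement) =====
-- stated objective: alternative
-- what changed: Replaces A's nested residue loops (outer 'for m in range(q)', inner 'while' stepping by q) with a single left-to-right pass that distributes each length-q slice into bucket i % q and concatenates the q buckets, after an explicit q <= 0 early return.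
import Mathlib
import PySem

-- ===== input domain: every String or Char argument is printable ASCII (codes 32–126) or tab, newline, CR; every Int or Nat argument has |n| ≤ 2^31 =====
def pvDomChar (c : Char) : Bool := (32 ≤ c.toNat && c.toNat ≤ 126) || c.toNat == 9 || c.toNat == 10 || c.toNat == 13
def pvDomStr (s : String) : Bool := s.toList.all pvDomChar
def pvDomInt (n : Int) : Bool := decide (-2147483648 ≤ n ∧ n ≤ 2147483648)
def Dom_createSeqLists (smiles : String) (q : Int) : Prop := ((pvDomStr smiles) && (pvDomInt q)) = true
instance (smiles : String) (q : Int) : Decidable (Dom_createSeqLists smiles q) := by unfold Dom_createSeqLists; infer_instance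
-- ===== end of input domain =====

-- B replaces A's nested outer-residue/inner-step loops by one pass that distributes
-- each slice into bucket i % q, then concatenates the q buckets (objective: alternative decomposition, same cost).

-- ===== PORT A =====
-- 'while len(smiles) < q: smiles = smiles + "_"'
-- (the fuel argument, (q - len).toNat = the number of iterations left, only makes the
--  recursion structural; the loop condition is still tested each iteration)
def pvPadA (q : Int) : Nat → List Char → List Char
  | 0, s => s
  | Nat.succ k, s => if (s.length : Int) < q then pvPadA q k (s ++ ['_']) else s

-- inner 'while lim < len(smiles): lingoList.append(smiles[lim:lim+q]); lim += q'
-- (fuel = len(smiles) bounds the iteration count — the loop is only entered from the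
--  'for m in range(q)' fold where q ≥ 1 and lim = m ≥ 0, so it runs at most len times;
--  the guard is still tested each iteration)
def pvInnerA (s : List Char) (q : Int) : Nat → List String → Int → List String
  | 0, acc, _ => acc
  | Nat.succ k, acc, lim =>
    if lim < (s.length : Int) then
      pvInnerA s q k (acc ++ [String.ofList (PySem.List.slice s (some lim) (some (lim + q)))]) (lim + q)
    else acc

def createSeqLists (smiles : String) (q : Int) : List String :=
  let s := PySem.Chars.upper smiles.toList
  let s := if (s.length : Int) < q then pvPadA q (q - (s.length : Int)).toNat s else s
  (PySem.List.pyRange 0 q 1).foldl (fun acc m => pvInnerA s q s.length acc m) []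

-- ===== PORT B =====
-- s[i:i+q]
def pvSliceB (s : List Char) (q : Int) (i : Nat) : String :=
  String.ofList (PySem.List.slice s (some (i : Int)) (some ((i : Int) + q)))

def createSeqLists_alt (smiles : String) (q : Int) : List String :=
  if q ≤ 0 then []
  else
    let s := PySem.Chars.upper smiles.toList
    let s := s ++ List.replicate (q - (s.length : Int)).toNat '_'
    let qn := q.toNat
    let buckets := (List.range s.length).foldl
      (fun bs i => bs.modify (i % qn) (fun b => b ++ [pvSliceB s q i]))
      (List.replicate qn ([] : List String))
    buckets.foldl (fun out b => out ++ b) []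

-- ===== PRECONDITION & SPEC =====
def Spec_createSeqLists (smiles : String) (q : Int) (out : List String) : Prop := out = createSeqLists_alt smiles q
instance (smiles : String) (q : Int) (out : List String) : Decidable (Spec_createSeqLists smiles q out) := by unfold Spec_createSeqLists; infer_instance

-- ===== CLAIM (what is proved, stated in full; the proofs are below) =====
def Claim_equal_createSeqLists : Prop := ∀ (smiles : String) (q : Int), Dom_createSeqLists smiles q → Spec_createSeqLists smiles q (createSeqLists smiles q)

-- ===== LEMMAS AND PROOFS =====

-- the arithmetic chain m, m+q, m+2q, … of slices that A's inner while loop produces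
def pvGchain (f : Nat → String) (qp n lim : Nat) : List String :=
  if h : lim < n then f lim :: pvGchain f qp n (lim + (qp + 1)) else []
termination_by n - lim
decreasing_by omega

lemma pvPadA_eq (q : Int) : ∀ (k : Nat) (s : List Char), (q - (s.length : Int)).toNat ≤ k →
    pvPadA q k s = s ++ List.replicate (q - (s.length : Int)).toNat '_' := by
  intro k
  induction k with
  | zero =>
    intro s hk
    have h0 : (q - (s.length : Int)).toNat = 0 := by omega
    rw [pvPadA, h0, List.replicate_zero, List.append_nil]
  | succ k ih =>
    intro s hk
    by_cases h : (s.length : Int) < q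
    · rw [pvPadA, if_pos h]
      rw [ih (s ++ ['_'])
        (by simp only [List.length_append, List.length_cons, List.length_nil]; omega)]
      have h1 : (q - (((s ++ ['_']).length : Nat) : Int)).toNat + 1 = (q - (s.length : Int)).toNat := by
        simp only [List.length_append, List.length_cons, List.length_nil]; omega
      rw [← h1, List.append_assoc]
      simp [List.replicate_succ]
    · have h0 : (q - (s.length : Int)).toNat = 0 := by omega
      rw [pvPadA, if_neg h, h0, List.replicate_zero, List.append_nil]

lemma pvInnerA_eq (s : List Char) (q : Int) (hq : 1 ≤ q) : ∀ (k : Nat) (lim : Int), 0 ≤ lim →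
    ((s.length : Int) - lim).toNat ≤ k → ∀ acc,
    pvInnerA s q k acc lim = acc ++ pvGchain (pvSliceB s q) (q.toNat - 1) s.length lim.toNat := by
  intro k
  induction k with
  | zero =>
    intro lim h0 hk acc
    have h' : ¬ (lim.toNat < s.length) := by omega
    rw [pvInnerA, pvGchain, dif_neg h', List.append_nil]
  | succ k ih =>
    intro lim h0 hk acc
    by_cases h : lim < (s.length : Int)
    · have h' : lim.toNat < s.length := by omega
      rw [pvInnerA, if_pos h]
      rw [ih (lim + q) (by omega) (by omega)]
      conv_rhs => rw [pvGchain]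
      rw [dif_pos h']
      have hqp : q.toNat - 1 + 1 = q.toNat := by omega
      have ht : (lim + q).toNat = lim.toNat + (q.toNat - 1 + 1) := by omega
      have hc : ((lim.toNat : Int)) = lim := by omega
      rw [ht]
      simp only [pvSliceB, hc, List.append_assoc, List.singleton_append]
    · have h' : ¬ (lim.toNat < s.length) := by omega
      rw [pvInnerA, if_neg h, pvGchain, dif_neg h', List.append_nil]

lemma pvGchain_succ (f : Nat → String) (qp : Nat) : ∀ (k n lim : Nat), n + 1 - lim ≤ k →
    pvGchain f qp (n+1) lim
      = pvGchain f qp n lim ++ (if lim ≤ n ∧ (n - lim) % (qp + 1) = 0 then [f n] else []) := by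
  intro k
  induction k with
  | zero =>
    intro n lim hk
    have h1 : ¬ (lim < n + 1) := by omega
    have h2 : ¬ (lim < n) := by omega
    have h3 : ¬ (lim ≤ n ∧ (n - lim) % (qp + 1) = 0) := by omega
    conv_lhs => rw [pvGchain]
    rw [dif_neg h1, pvGchain, dif_neg h2, if_neg h3]
    rfl
  | succ k ih =>
    intro n lim hk
    rcases Nat.lt_trichotomy lim n with hlt | heq | hgt
    · conv_lhs => rw [pvGchain]
      rw [dif_pos (by omega : lim < n + 1)]
      rw [ih n (lim + (qp + 1)) (by omega)]
      conv_rhs => rw [pvGchain]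
      rw [dif_pos hlt]
      have hcond : (lim + (qp + 1) ≤ n ∧ (n - (lim + (qp + 1))) % (qp + 1) = 0)
          ↔ (lim ≤ n ∧ (n - lim) % (qp + 1) = 0) := by
        constructor
        · rintro ⟨h1, h2⟩
          refine ⟨by omega, ?_⟩
          have he : n - lim = (n - (lim + (qp + 1))) + (qp + 1) := by omega
          rw [he, Nat.add_mod_right]
          exact h2
        · rintro ⟨h1, h2⟩
          by_cases hle : lim + (qp + 1) ≤ n
          · refine ⟨hle, ?_⟩
            have he : n - lim = (n - (lim + (qp + 1))) + (qp + 1) := by omega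
            rw [he, Nat.add_mod_right] at h2
            exact h2
          · exfalso
            have hlt2 : n - lim < qp + 1 := by omega
            have := Nat.mod_eq_of_lt hlt2
            omega
      rw [if_congr hcond rfl rfl]
      simp [List.cons_append]
    · subst heq
      conv_lhs => rw [pvGchain]
      rw [dif_pos (by omega : lim < lim + 1)]
      rw [pvGchain, dif_neg (by omega : ¬ lim + (qp + 1) < lim + 1)]
      conv_rhs => rw [pvGchain]
      rw [dif_neg (by omega : ¬ lim < lim)]
      simp
    · have h1 : ¬ (lim < n + 1) := by omega
      have h2 : ¬ (lim < n) := by omega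
      have h3 : ¬ (lim ≤ n ∧ (n - lim) % (qp + 1) = 0) := by omega
      conv_lhs => rw [pvGchain]
      rw [dif_neg h1, pvGchain, dif_neg h2, if_neg h3]
      rfl

lemma pvChain_eq_filter (f : Nat → String) (qp : Nat) (m : Nat) (hm : m < qp + 1) :
    ∀ n, pvGchain f qp n m = ((List.range n).filter (fun i => i % (qp + 1) == m)).map f := by
  intro n
  induction n with
  | zero =>
    rw [pvGchain, dif_neg (by omega : ¬ m < 0)]
    rfl
  | succ n ih =>
    rw [pvGchain_succ f qp (n + 1) n m (by omega), ih]
    rw [List.range_succ, List.filter_append, List.map_append, List.filter_singleton]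
    congr 1
    have hcond : (m ≤ n ∧ (n - m) % (qp + 1) = 0) ↔ n % (qp + 1) = m := by
      constructor
      · rintro ⟨h1, h2⟩
        have hdvd : (qp + 1) ∣ n - m := Nat.dvd_iff_mod_eq_zero.mpr h2
        have hmod := (Nat.modEq_iff_dvd' h1).mpr hdvd
        unfold Nat.ModEq at hmod
        rw [Nat.mod_eq_of_lt hm] at hmod
        omega
      · intro h
        have h1 : m ≤ n := by
          by_contra hlt
          have : n % (qp + 1) = n := Nat.mod_eq_of_lt (by omega)
          omega
        refine ⟨h1, ?_⟩
        have hmod : m ≡ n [MOD qp + 1] := by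
          unfold Nat.ModEq
          rw [Nat.mod_eq_of_lt hm, h]
        exact Nat.dvd_iff_mod_eq_zero.mp ((Nat.modEq_iff_dvd' h1).mp hmod)
    by_cases h : n % (qp + 1) = m
    · have hb : (n % (qp + 1) == m) = true := by simpa using h
      rw [if_pos (hcond.mpr h)]
      simp [hb]
    · have hb : (n % (qp + 1) == m) = false := by simpa using h
      rw [if_neg (fun hc => h (hcond.mp hc))]
      simp [hb]

lemma pvBuckets_eq (f : Nat → String) (Q : Nat) : ∀ t : Nat,
    (List.range t).foldl (fun bs i => bs.modify (i % Q) (fun b => b ++ [f i]))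
        (List.replicate Q ([] : List String))
      = (List.range Q).map (fun m => ((List.range t).filter (fun i => i % Q == m)).map f) := by
  intro t
  induction t with
  | zero =>
    simp
  | succ t ih =>
    rw [List.range_succ, List.foldl_append, ih]
    simp only [List.foldl_cons, List.foldl_nil]
    apply List.ext_getElem
    · simp
    · intro j hj1 hj2
      have hjQ : j < Q := by simpa using hj2
      rw [List.getElem_modify]
      simp only [List.getElem_map, List.getElem_range]
      rw [List.filter_append, List.filter_singleton, List.map_append]
      by_cases h : t % Q = j
      · have hb : (t % Q == j) = true := by simpa using h
        rw [if_pos h]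
        simp [hb]
      · have hb : (t % Q == j) = false := by simpa using h
        rw [if_neg h]
        simp [hb]

-- ===== VERDICT (by name: the statement is the Claim_ definition above) =====
theorem createSeqLists_spec : Claim_equal_createSeqLists := by
  intro smiles q _
  unfold Spec_createSeqLists createSeqLists createSeqLists_alt
  dsimp only
  by_cases hq : q ≤ 0
  · rw [if_pos hq, PySem.List.pyRange_one_eq_nil hq]
    rfl
  · rw [if_neg hq]
    have hq1 : 1 ≤ q := by omega
    set s0 := PySem.Chars.upper smiles.toList with hs0
    have hpad : (if (s0.length : Int) < q then pvPadA q (q - (s0.length : Int)).toNat s0 else s0)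
        = s0 ++ List.replicate (q - (s0.length : Int)).toNat '_' := by
      by_cases h : (s0.length : Int) < q
      · rw [if_pos h, pvPadA_eq q (q - (s0.length : Int)).toNat s0 le_rfl]
      · have h0 : (q - (s0.length : Int)).toNat = 0 := by omega
        rw [if_neg h, h0, List.replicate_zero, List.append_nil]
    rw [hpad]
    set s := s0 ++ List.replicate (q - (s0.length : Int)).toNat '_' with hs
    set Q := q.toNat with hQdef
    have hQ1 : Q - 1 + 1 = Q := by omega
    have hqQ : q = (Q : Int) := by omega
    rw [hqQ, PySem.List.pyRange_zero_nat, List.foldl_map]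
    have hbody : ∀ (acc : List String) (m : Nat), m ∈ List.range Q →
        pvInnerA s ((Q : Int)) s.length acc ((m : Nat) : Int)
          = acc ++ pvGchain (pvSliceB s ((Q : Int))) (Q - 1) s.length m := by
      intro acc m _
      rw [pvInnerA_eq s ((Q : Int)) (by omega) s.length (m : Int) (by omega) (by omega)]
      simp only [Int.toNat_natCast]
    rw [PySem.List.foldl_congr_mem (List.range Q)
        (fun acc m => pvInnerA s ((Q : Int)) s.length acc ((m : Nat) : Int))
        (fun acc m => acc ++ pvGchain (pvSliceB s ((Q : Int))) (Q - 1) s.length m)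
        [] hbody]
    rw [PySem.List.foldl_append_eq_flatMap, List.nil_append]
    rw [pvBuckets_eq (pvSliceB s ((Q : Int))) Q s.length]
    rw [PySem.List.foldl_append_eq_flatten, List.nil_append]
    rw [List.flatMap_def]
    congr 1
    apply List.map_congr_left
    intro m hm
    have hmQ : m < Q := by simpa using hm
    rw [pvChain_eq_filter (pvSliceB s ((Q : Int))) (Q - 1) m (by omega), hQ1]
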